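-- pv_equiv track=rewrite | github.com/briannam2024/tui-wordle-assistant | wordle.py | yellow_test
-- ===== SOURCE A (Python) =====
-- def yellow_test(words:str,yellow_set:dict)->bool:
--     y_index=list(yellow_set.keys())
--     y_letters=list(yellow_set.values())
--     for i,letters in enumerate(words):
--         for num in y_index:
--             if i == num:
--                 if yellow_set[num] == letters:
--                     return False
--             if yellow_set[num] not in words:
--                 return False
--     return True
-- ===== SOURCE B (Python) =====
-- def yellow_test(words: str, yellow_set: dict) -> bool:
--     # One pass over the values, one pass over the word's indexed characters.
--     if any(v not in words for v in yellow_set.values()):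
--         return False
--     for i, ch in enumerate(words):
--         if yellow_set.get(i) == ch:
--             return False
--     return True
-- ===== Notes on version B (the rewrite author's own statement) =====
-- stated objective: simpler
-- what changed: Replaces A's nested position-by-key scan, which re-tests every yellow value's substring membership at every character position, with two independent single passes: one over the dict's values, one over the word's indexed characters using dict.get.
-- intended difference: On an empty words string with at least one nonempty yellow value, A returns True (its character loop never runs so no check fires) while B returns False, the intended result since a required yellow letter cannot occur in the empty word. — e.g. on yellow_test("", [(0, "a")]): A returns true, B returns false
import Mathlib
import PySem

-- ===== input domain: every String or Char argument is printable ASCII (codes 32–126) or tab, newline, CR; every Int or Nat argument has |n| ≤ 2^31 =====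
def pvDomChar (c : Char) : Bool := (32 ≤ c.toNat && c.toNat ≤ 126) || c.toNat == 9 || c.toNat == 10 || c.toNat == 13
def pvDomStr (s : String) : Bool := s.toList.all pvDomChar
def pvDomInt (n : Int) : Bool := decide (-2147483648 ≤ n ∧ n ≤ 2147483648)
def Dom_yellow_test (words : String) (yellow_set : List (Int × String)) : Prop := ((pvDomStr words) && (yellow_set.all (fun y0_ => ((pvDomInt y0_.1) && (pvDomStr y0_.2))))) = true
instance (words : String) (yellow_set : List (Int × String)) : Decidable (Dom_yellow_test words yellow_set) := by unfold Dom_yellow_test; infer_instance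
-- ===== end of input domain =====

-- B replaces A's nested position-by-key scan with two independent single passes
-- (values, then indexed characters); return-value equivalence outside D_ below.

-- ===== PORT A =====
-- dict lookup = first match in the association list (per the type convention)
def pyLookup (ys : List (Int × String)) (k : Int) : String :=
  ((ys.find? (fun p => p.1 == k)).map (·.2)).getD ""

-- inner 'for num in y_index' loop of A (true = some 'return False' fired)
def yellowInnerA (words : String) (ys : List (Int × String)) (i : Int) (c : Char) :
    List Int → Bool
  | [] => false
  | num :: rest =>
    if i == num && pyLookup ys num == String.ofList [c] then true
    else if !(PySem.Str.isIn (pyLookup ys num) words) then true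
    else yellowInnerA words ys i c rest

-- outer 'for i, letters in enumerate(words)' loop of A
def yellowOuterA (words : String) (ys : List (Int × String)) :
    List (Int × Char) → Bool
  | [] => true
  | (i, c) :: rest =>
    if yellowInnerA words ys i c (ys.map (·.1)) then false
    else yellowOuterA words ys rest

def yellow_test (words : String) (yellow_set : List (Int × String)) : Bool :=
  let _y_letters := yellow_set.map (·.2)   -- A computes y_letters but never uses it
  yellowOuterA words yellow_set (PySem.List.enumerate words.toList)

-- ===== PORT B =====
-- second loop of B: 'for i, ch in enumerate(words): if yellow_set.get(i) == ch: return False'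
def yellowPosB (ys : List (Int × String)) : List (Int × Char) → Bool
  | [] => true
  | (i, c) :: rest =>
    if ((ys.find? (fun p => p.1 == i)).map (·.2)) == some (String.ofList [c]) then false
    else yellowPosB ys rest

def yellow_test_alt (words : String) (yellow_set : List (Int × String)) : Bool :=
  if (yellow_set.map (·.2)).any (fun v => !(PySem.Str.isIn v words)) then false
  else yellowPosB yellow_set (PySem.List.enumerate words.toList)

-- ===== PRECONDITION & SPEC =====
-- Pre_ excludes association lists with duplicate keys: they are not the image of any
-- Python dict (A's parameter type), so no input of A is excluded.
def Pre_yellow_test (words : String) (yellow_set : List (Int × String)) : Prop :=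
  (yellow_set.map (·.1)).Nodup
instance (words : String) (yellow_set : List (Int × String)) : Decidable (Pre_yellow_test words yellow_set) := by unfold Pre_yellow_test; infer_instance

def pvWitness_yellow_test : String × (List (Int × String)) := ("ab", [(0, "b")])

-- On an empty words string with at least one nonempty yellow value, A returns True (its
-- character loop never runs) while B returns False, the intended result since a required
-- yellow letter cannot occur in the empty word.
def D_yellow_test (words : String) (yellow_set : List (Int × String)) : Prop :=
  words.toList = [] ∧ ∃ p ∈ yellow_set, p.2 ≠ ""
instance (words : String) (yellow_set : List (Int × String)) : Decidable (D_yellow_test words yellow_set) := by unfold D_yellow_test; infer_instance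

def Spec_yellow_test (words : String) (yellow_set : List (Int × String)) (out : Bool) : Prop := ¬ D_yellow_test words yellow_set → out = yellow_test_alt words yellow_set
instance (words : String) (yellow_set : List (Int × String)) (out : Bool) : Decidable (Spec_yellow_test words yellow_set out) := by unfold Spec_yellow_test; infer_instance

def pvDiffWitness_yellow_test : String × (List (Int × String)) := ("", [(0, "a")])
def pvDiffWitnessOut_yellow_test : Bool × Bool := (true, false)

-- ===== CLAIM (what is proved, stated in full; the proofs are below) =====
def Claim_unchanged_yellow_test : Prop := ∀ (words : String) (yellow_set : List (Int × String)), Dom_yellow_test words yellow_set → Pre_yellow_test words yellow_set → Spec_yellow_test words yellow_set (yellow_test words yellow_set)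
def Claim_changed_yellow_test : Prop := Dom_yellow_test (pvDiffWitness_yellow_test.1) (pvDiffWitness_yellow_test.2) ∧ Pre_yellow_test (pvDiffWitness_yellow_test.1) (pvDiffWitness_yellow_test.2) ∧ D_yellow_test (pvDiffWitness_yellow_test.1) (pvDiffWitness_yellow_test.2) ∧ yellow_test (pvDiffWitness_yellow_test.1) (pvDiffWitness_yellow_test.2) = pvDiffWitnessOut_yellow_test.1 ∧ yellow_test_alt (pvDiffWitness_yellow_test.1) (pvDiffWitness_yellow_test.2) = pvDiffWitnessOut_yellow_test.2 ∧ pvDiffWitnessOut_yellow_test.1 ≠ pvDiffWitnessOut_yellow_test.2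
def Claim_exact_yellow_test : Prop := ∀ (words : String) (yellow_set : List (Int × String)), Dom_yellow_test words yellow_set → Pre_yellow_test words yellow_set → D_yellow_test words yellow_set → yellow_test words yellow_set ≠ yellow_test_alt words yellow_set

-- ===== LEMMAS AND PROOFS =====

theorem innerA_false_iff (words : String) (ys : List (Int × String)) (i : Int) (c : Char)
    (nums : List Int) :
    yellowInnerA words ys i c nums = false ↔
      ∀ num ∈ nums, ((i == num && pyLookup ys num == String.ofList [c]) = false ∧
        PySem.Str.isIn (pyLookup ys num) words = true) := by
  induction nums with
  | nil => simp [yellowInnerA]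
  | cons n rest ih =>
    simp only [yellowInnerA, List.mem_cons]
    split_ifs with h1 h2
    · constructor
      · intro h; exact absurd h (by simp)
      · intro hc; exact absurd (hc n (Or.inl rfl)).1 (by simp [h1])
    · simp only [Bool.not_eq_true'] at h2
      constructor
      · intro h; exact absurd h (by simp)
      · intro hc; exact absurd (hc n (Or.inl rfl)).2 (by rw [h2]; simp)
    · simp only [Bool.not_eq_true] at h1
      simp only [Bool.not_eq_true, Bool.not_eq_false'] at h2
      rw [ih]
      constructor
      · intro h num hm
        rcases hm with rfl | hm
        · exact ⟨h1, h2⟩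
        · exact h num hm
      · intro h num hm; exact h num (Or.inr hm)

theorem outerA_true_iff (words : String) (ys : List (Int × String)) (l : List (Int × Char)) :
    yellowOuterA words ys l = true ↔
      ∀ p ∈ l, yellowInnerA words ys p.1 p.2 (ys.map (·.1)) = false := by
  induction l with
  | nil => simp [yellowOuterA]
  | cons p rest ih =>
    obtain ⟨i, c⟩ := p
    simp only [yellowOuterA, List.mem_cons]
    split_ifs with h
    · simp only [false_iff]
      intro hall
      exact absurd h (by simp [hall (i, c) (Or.inl rfl)])
    · simp only [Bool.not_eq_true] at h
      rw [ih]
      constructor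
      · intro hall p hp
        rcases hp with rfl | hp
        · exact h
        · exact hall p hp
      · intro hall p hp; exact hall p (Or.inr hp)

theorem posB_true_iff (ys : List (Int × String)) (l : List (Int × Char)) :
    yellowPosB ys l = true ↔
      ∀ p ∈ l, (((ys.find? (fun q => q.1 == p.1)).map (·.2)) == some (String.ofList [p.2])) = false := by
  induction l with
  | nil => simp [yellowPosB]
  | cons p rest ih =>
    obtain ⟨i, c⟩ := p
    simp only [yellowPosB, List.mem_cons]
    split_ifs with h
    · simp only [false_iff]
      intro hall
      exact absurd h (by simp [hall (i, c) (Or.inl rfl)])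
    · rw [ih]
      constructor
      · intro hall p hp
        rcases hp with rfl | hp
        · simpa using h
        · exact hall p hp
      · intro hall p hp; exact hall p (Or.inr hp)

-- with unique keys, the first-match lookup of a present pair returns its value
theorem pyLookup_mem (ys : List (Int × String)) (hnd : (ys.map (·.1)).Nodup)
    {p : Int × String} (hp : p ∈ ys) : pyLookup ys p.1 = p.2 := by
  induction ys with
  | nil => cases hp
  | cons q rest ih =>
    simp only [List.map_cons, List.nodup_cons] at hnd
    rcases List.mem_cons.1 hp with rfl | hp
    · simp [pyLookup]
    · have hne : q.1 ≠ p.1 := by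
        intro h
        exact hnd.1 (h ▸ List.mem_map.2 ⟨p, hp, rfl⟩)
      have := ih hnd.2 hp
      unfold pyLookup at this ⊢
      rw [List.find?_cons_of_neg (by simpa using hne)]
      exact this

-- the position condition on one index: A's scan over all keys vs B's single lookup
theorem pos_bridge (ys : List (Int × String)) (hnd : (ys.map (·.1)).Nodup)
    (i : Int) (c : Char) :
    (∀ num ∈ ys.map (·.1), (i == num && pyLookup ys num == String.ofList [c]) = false) ↔
      (((ys.find? (fun q => q.1 == i)).map (·.2)) == some (String.ofList [c])) = false := by
  by_cases hmem : i ∈ ys.map (·.1)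
  · obtain ⟨p, hp, hpi⟩ := List.mem_map.1 hmem
    have hfind : ys.find? (fun q => q.1 == i) = some p := by
      rcases hf : ys.find? (fun q => q.1 == i) with _ | q
      · exact absurd (List.find?_eq_none.1 hf p hp) (by simp [hpi])
      · have hq : q.1 = i := by simpa using List.find?_some hf
        -- unique keys: same key, both members ⇒ equal pairs
        have hqp : q = p :=
          List.inj_on_of_nodup_map hnd (List.mem_of_find?_eq_some hf) hp (by rw [hq, hpi])
        exact hqp ▸ hf
    have hlk : pyLookup ys i = p.2 := by rw [← hpi]; exact pyLookup_mem ys hnd hp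
    rw [hfind]
    constructor
    · intro h
      have h0 := h i hmem
      simp only [beq_self_eq_true, Bool.true_and, hlk] at h0
      simpa using h0
    · intro h num hnum
      by_cases hin : i = num
      · rcases hin
        simp only [beq_self_eq_true, Bool.true_and, hlk]
        simpa using h
      · have : (i == num) = false := by simpa using hin
        rw [this, Bool.false_and]
  · constructor
    · intro _
      have : ys.find? (fun q => q.1 == i) = none := by
        apply List.find?_eq_none.2
        intro q hq hqi
        have hq1 : q.1 = i := by simpa using hqi
        exact hmem (hq1 ▸ List.mem_map.2 ⟨q, hq, rfl⟩)
      rw [this]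
      rfl
    · intro _ num hnum
      have : (i == num) = false := by
        simp only [beq_eq_false_iff_ne, ne_eq]
        intro h
        exact hmem (h ▸ hnum)
      rw [this, Bool.false_and]

-- substring condition: A's scan over keys vs B's scan over values (unique keys)
theorem sub_bridge (words : String) (ys : List (Int × String)) (hnd : (ys.map (·.1)).Nodup) :
    (∀ num ∈ ys.map (·.1), PySem.Str.isIn (pyLookup ys num) words = true) ↔
      (∀ v ∈ ys.map (·.2), PySem.Str.isIn v words = true) := by
  constructor
  · intro h v hv
    obtain ⟨p, hp, rfl⟩ := List.mem_map.1 hv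
    have := h p.1 (List.mem_map.2 ⟨p, hp, rfl⟩)
    rwa [pyLookup_mem ys hnd hp] at this
  · intro h num hnum
    obtain ⟨p, hp, rfl⟩ := List.mem_map.1 hnum
    rw [pyLookup_mem ys hnd hp]
    exact h p.2 (List.mem_map.2 ⟨p, hp, rfl⟩)

-- a nonempty string is not a substring of the empty string
theorem isIn_empty_of_ne (v : String) (hv : v ≠ "") : PySem.Str.isIn v "" = false := by
  rcases h : PySem.Str.isIn v "" with _ | _
  · rfl
  · exfalso
    have := (PySem.Str.isIn_iff_infix v "").1 h
    have hnil : ("" : String).toList = [] := rfl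
    rw [hnil, List.infix_nil] at this
    exact hv (by cases v; simp_all)

theorem alt_true_iff (words : String) (ys : List (Int × String)) :
    yellow_test_alt words ys = true ↔
      ((ys.map (·.2)).any (fun v => !(PySem.Str.isIn v words)) = false ∧
        yellowPosB ys (PySem.List.enumerate words.toList) = true) := by
  unfold yellow_test_alt
  split_ifs with h
  · constructor
    · intro hc; exact hc.elim
    · rintro ⟨h1, _⟩; rw [h] at h1; exact Bool.noConfusion h1
  · simp only [Bool.not_eq_true] at h
    rw [h]
    simp

-- main equivalence on nonempty words (keys unique)
theorem eq_of_nonempty (words : String) (ys : List (Int × String))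
    (hnd : (ys.map (·.1)).Nodup) (hne : words.toList ≠ []) :
    yellow_test words ys = yellow_test_alt words ys := by
  rw [Bool.eq_iff_iff]
  unfold yellow_test
  rw [outerA_true_iff, alt_true_iff, posB_true_iff]
  have henum : PySem.List.enumerate words.toList ≠ [] := by
    rcases h : words.toList with _ | ⟨c, cs⟩
    · exact absurd h hne
    · rw [PySem.List.enumerate_cons]
      simp
  obtain ⟨p0, hp0⟩ := List.exists_mem_of_ne_nil _ henum
  constructor
  · intro h
    have hsub : ∀ num ∈ ys.map (·.1), PySem.Str.isIn (pyLookup ys num) words = true :=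
      fun num hnum => ((innerA_false_iff _ _ _ _ _).1 (h p0 hp0) num hnum).2
    refine ⟨?_, ?_⟩
    · rw [List.any_eq_false]
      intro v hv
      rw [(sub_bridge words ys hnd).1 hsub v hv]
      simp
    · intro p hp
      exact (pos_bridge ys hnd p.1 p.2).1
        (fun num hnum => ((innerA_false_iff _ _ _ _ _).1 (h p hp) num hnum).1)
  · rintro ⟨hany, hpos⟩ p hp
    rw [innerA_false_iff]
    intro num hnum
    refine ⟨(pos_bridge ys hnd p.1 p.2).2 (hpos p hp) num hnum, ?_⟩
    refine (sub_bridge words ys hnd).2 ?_ num hnum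
    intro v hv
    rw [List.any_eq_false] at hany
    have := hany v hv
    simpa using this

-- on empty words outside D_ (all values empty) both programs return true
theorem eq_of_empty (words : String) (ys : List (Int × String))
    (hw : words.toList = []) (hall : ∀ p ∈ ys, p.2 = "") :
    yellow_test words ys = yellow_test_alt words ys := by
  have hwe : words = "" := by cases words; simp_all
  subst hwe
  have hE : PySem.Str.isIn "" "" = true := (PySem.Str.isIn_iff_infix "" "").2 (by simp)
  have henum : PySem.List.enumerate ("" : String).toList = [] := rfl
  unfold yellow_test yellow_test_alt
  rw [henum]
  have hany : (ys.map (·.2)).any (fun v => !(PySem.Str.isIn v "")) = false := by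
    rw [List.any_eq_false]
    intro v hv
    obtain ⟨p, hp, rfl⟩ := List.mem_map.1 hv
    rw [hall p hp, hE]
    simp
  rw [if_neg (by rw [hany]; simp)]
  rfl

-- ===== VERDICT (by name: the statement is the Claim_ definition above) =====
theorem yellow_test_spec : Claim_unchanged_yellow_test := by
  intro words ys _hdom hpre hnd
  by_cases hw : words.toList = []
  · have hall : ∀ p ∈ ys, p.2 = "" := by
      intro p hp
      by_contra hne
      exact hnd ⟨hw, p, hp, hne⟩
    exact eq_of_empty words ys hw hall
  · exact eq_of_nonempty words ys hpre hw

theorem yellow_test_changed : Claim_changed_yellow_test := by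
  unfold Claim_changed_yellow_test; decide

theorem yellow_test_tight : Claim_exact_yellow_test := by
  intro words ys _hdom _hpre hd
  obtain ⟨hw, p, hp, hv⟩ := hd
  have hwe : words = "" := by cases words; simp_all
  subst hwe
  have hA : yellow_test "" ys = true := rfl
  have hB : yellow_test_alt "" ys = false := by
    unfold yellow_test_alt
    rw [if_pos]
    rw [List.any_eq_true]
    refine ⟨p.2, List.mem_map.2 ⟨p, hp, rfl⟩, ?_⟩
    rw [isIn_empty_of_ne p.2 hv]
    rfl
  rw [hA, hB]
  simp
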